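-- pv_equiv track=rewrite | github.com/JoyD424/Dementia_Detection | metrics.py | countRepetitions
-- ===== SOURCE A (Python) =====
-- def countRepetitions(tokens):
--     hashTable = {}
--     totalRepetitions = 0
--
--     # Identify repetitions
--     for index, token in enumerate(tokens):
--         token = token.lower() # Dict is case-sensitive, make sure tokens are uniform
--         if hashTable.get(token) != None: #If token is already in hash table, make sure the program knows it has appeared multiple times
--             hashTable[token] += 1
--             totalRepetitions += 1
--         else:
--             hashTable[token] = 1
--         if index >= 10: # Only looking for repetitions within 10 subsequent tokens
--             tokenToRemove = tokens[index - 10].lower()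
--             hashTable[tokenToRemove] -= 1
--             if hashTable[tokenToRemove] <= 0:
--                 del hashTable[tokenToRemove]
--     return totalRepetitions
-- ===== SOURCE B (Python) =====
-- def countRepetitions(tokens):
--     total = 0
--     for i in range(len(tokens)):
--         window = [t.lower() for t in tokens[max(0, i - 10):i]]
--         if tokens[i].lower() in window:
--             total += 1
--     return total
-- ===== Notes on version B (the rewrite author's own statement) =====
-- stated objective: simpler
-- what changed: Replaces the incrementally maintained count dictionary (insert/decrement/delete bookkeeping) with a direct per-index membership test of the token in the lowered 10-token sliding window slice.
import Mathlib
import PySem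

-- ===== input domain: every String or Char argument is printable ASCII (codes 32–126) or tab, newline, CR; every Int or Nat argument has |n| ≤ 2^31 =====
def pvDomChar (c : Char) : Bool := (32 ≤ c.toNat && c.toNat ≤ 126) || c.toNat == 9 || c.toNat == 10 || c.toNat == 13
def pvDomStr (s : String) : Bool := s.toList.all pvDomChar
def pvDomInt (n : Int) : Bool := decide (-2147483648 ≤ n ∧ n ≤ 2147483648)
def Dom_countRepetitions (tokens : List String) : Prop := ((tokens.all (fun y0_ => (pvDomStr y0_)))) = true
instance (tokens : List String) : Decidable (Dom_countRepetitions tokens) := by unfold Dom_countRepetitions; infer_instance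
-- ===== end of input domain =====

-- B replaces A's incrementally maintained count dictionary by a direct membership
-- test in the lowered 10-token window slice before each index (objective: simpler).


-- ===== PORT A =====
-- `hashTable[tokenToRemove] -= 1` is read with getD 0: the key is always present there
-- (it was inserted within the last 10 iterations), so the default is never consulted;
-- likewise `tokens[index - 10]` is always in range, so pyGetD's default "" is never used.
def countRepetitions (tokens : List String) : Int :=
  ((PySem.List.enumerate tokens).foldl
    (fun (st : PySem.Dict String Int × Int) (p : Int × String) =>
      let index := p.1
      let token := PySem.Str.lower p.2
      let st1 :=
        match st.1.get? token with
        | some v => (st.1.insert token (v + 1), st.2 + 1)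
        | none => (st.1.insert token 1, st.2)
      if 10 ≤ index then
        let tokenToRemove := PySem.Str.lower (PySem.List.pyGetD tokens (index - 10) "")
        let c := st1.1.getD tokenToRemove 0 - 1
        let ht := st1.1.insert tokenToRemove c
        if c ≤ 0 then (ht.erase tokenToRemove, st1.2) else (ht, st1.2)
      else st1)
    (PySem.Dict.empty, 0)).2

-- ===== PORT B =====
def countRepetitions_alt (tokens : List String) : Int :=
  (PySem.List.pyRange 0 (tokens.length : Int) 1).foldl
    (fun total i =>
      let window := (PySem.List.slice tokens (some (max 0 (i - 10))) (some i)).map PySem.Str.lower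
      if window.contains (PySem.Str.lower (PySem.List.pyGetD tokens i "")) then total + 1
      else total)
    0

-- ===== PRECONDITION & SPEC =====
def Spec_countRepetitions (tokens : List String) (out : Int) : Prop := out = countRepetitions_alt tokens
instance (tokens : List String) (out : Int) : Decidable (Spec_countRepetitions tokens out) := by unfold Spec_countRepetitions; infer_instance

-- ===== CLAIM (what is proved, stated in full; the proofs are below) =====
def Claim_equal_countRepetitions : Prop := ∀ (tokens : List String), Dom_countRepetitions tokens → Spec_countRepetitions tokens (countRepetitions tokens)

-- ===== LEMMAS AND PROOFS =====

def pvWin (tokens : List String) (i : Nat) : List String :=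
  ((tokens.map PySem.Str.lower).take i).drop (i - 10)

def pvHit (tokens : List String) (i : Nat) : Bool :=
  (pvWin tokens i).contains ((tokens.map PySem.Str.lower).getD i "")

-- window step lemmas
theorem pvWin_succ_lt (tokens : List String) (i : Nat) (hi : i < tokens.length) (h : i < 10) :
    pvWin tokens (i + 1) = pvWin tokens i ++ [PySem.Str.lower tokens[i]] := by
  have hilen : i < (tokens.map PySem.Str.lower).length := by simpa using hi
  unfold pvWin
  rw [show i + 1 - 10 = 0 by omega, show i - 10 = 0 by omega, List.drop_zero, List.drop_zero,
      List.take_add_one, List.getElem?_eq_getElem hilen]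
  simp

theorem pvWin_succ_ge (tokens : List String) (i : Nat) (hi : i < tokens.length) (h : 10 ≤ i) :
    pvWin tokens i ++ [PySem.Str.lower tokens[i]] =
      PySem.Str.lower (tokens[i - 10]'(by omega)) :: pvWin tokens (i + 1) := by
  have hilen : i < (tokens.map PySem.Str.lower).length := by simpa using hi
  have hlt : i - 10 < (List.take i (tokens.map PySem.Str.lower)).length := by
    simp; omega
  unfold pvWin
  rw [List.take_add_one, List.getElem?_eq_getElem hilen]
  rw [show i + 1 - 10 = (i - 10) + 1 by omega]
  rw [List.drop_append_of_le_length (by simp; omega)]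
  rw [List.drop_eq_getElem_cons hlt, List.getElem_take, List.getElem_map]
  simp

theorem pv_get?_erase (d : PySem.Dict String Int) (k k' : String) :
    (d.erase k).get? k' = if k' = k then none else d.get? k' := by
  obtain ⟨items⟩ := d
  by_cases h : k' = k
  · subst h
    simp only [PySem.Dict.erase, PySem.Dict.get?, if_pos rfl]
    rw [List.find?_eq_none.mpr]
    · rfl
    · intro x hx
      simp only [List.mem_filter, Bool.not_eq_eq_eq_not, Bool.not_true] at hx
      simp [hx.2]
  · simp only [PySem.Dict.erase, PySem.Dict.get?, if_neg h]
    congr 1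
    induction items with
    | nil => rfl
    | cons p rest ih =>
      by_cases hp : p.1 = k
      · have hb : (k == k') = false := by
          simp only [beq_eq_false_iff_ne]; exact fun e => h e.symm
        simp [List.filter_cons, hp, List.find?_cons, hb, ih]
      · cases hb : (p.1 == k') <;> simp [List.filter_cons, hp, List.find?_cons, hb, ih]

theorem pvInv_insert (w : List String) (d : PySem.Dict String Int) (x : String)
    (hd : ∀ k, d.get? k = if 0 < w.count k then some ((w.count k : Int)) else none) (k : String) :
    (d.insert x ((w.count x : Int) + 1)).get? k =
      if 0 < (w ++ [x]).count k then some (((w ++ [x]).count k : Int)) else none := by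
  by_cases hk : k = x
  · subst hk
    rw [PySem.Dict.get?_insert_self]
    have : (w ++ [k]).count k = w.count k + 1 := by
      simp [List.count_append]
    rw [this, if_pos (by omega)]
    push_cast
    ring_nf
  · rw [PySem.Dict.get?_insert_of_ne _ _ hk, hd k]
    have : (w ++ [x]).count k = w.count k := by
      simp [List.count_append, List.count_singleton]
      intro e; exact absurd e.symm hk
    rw [this]

theorem pvInv_remove (w2 : List String) (r : String) (d1 : PySem.Dict String Int)
    (hd1 : ∀ k, d1.get? k = if 0 < (r :: w2).count k then some (((r :: w2).count k : Int)) else none)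
    (k : String) :
    (if d1.getD r 0 - 1 ≤ 0 then (d1.insert r (d1.getD r 0 - 1)).erase r
     else d1.insert r (d1.getD r 0 - 1)).get? k =
      if 0 < w2.count k then some ((w2.count k : Int)) else none := by
  have hcr : (r :: w2).count r = w2.count r + 1 := by
    simp [List.count_cons]
  have hgd : d1.getD r 0 = ((r :: w2).count r : Int) := by
    rw [PySem.Dict.getD_eq_get?_getD, hd1 r, if_pos (by omega)]; rfl
  have hc : d1.getD r 0 - 1 = (w2.count r : Int) := by rw [hgd, hcr]; push_cast; ring
  by_cases hk : k = r
  · subst hk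
    by_cases hz : w2.count k = 0
    · rw [if_pos (by rw [hc, hz]; simp), pv_get?_erase, if_pos rfl, if_neg (by omega)]
    · rw [if_neg (by rw [hc]; omega), PySem.Dict.get?_insert_self, if_pos (by omega), hc]
  · have hck : (r :: w2).count k = w2.count k := by
      simp [List.count_cons]
      intro e; exact absurd e.symm hk
    by_cases hz : d1.getD r 0 - 1 ≤ 0
    · rw [if_pos hz, pv_get?_erase, if_neg hk, PySem.Dict.get?_insert_of_ne _ _ hk, hd1 k, hck]
    · rw [if_neg hz, PySem.Dict.get?_insert_of_ne _ _ hk, hd1 k, hck]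

def pvInv (tokens : List String) (i : Nat) (d : PySem.Dict String Int) : Prop :=
  ∀ k, d.get? k =
    if 0 < (pvWin tokens i).count k then some (((pvWin tokens i).count k : Int)) else none

theorem pvA_loop (tokens : List String) (rest : List String) (i : Nat)
    (d : PySem.Dict String Int) (tot : Int)
    (hrest : rest = tokens.drop i) (hinv : pvInv tokens i d) :
    ((PySem.List.enumerate rest (i : Int)).foldl
      (fun (st : PySem.Dict String Int × Int) (p : Int × String) =>
        let index := p.1
        let token := PySem.Str.lower p.2
        let st1 :=
          match st.1.get? token with
          | some v => (st.1.insert token (v + 1), st.2 + 1)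
          | none => (st.1.insert token 1, st.2)
        if 10 ≤ index then
          let tokenToRemove := PySem.Str.lower (PySem.List.pyGetD tokens (index - 10) "")
          let c := st1.1.getD tokenToRemove 0 - 1
          let ht := st1.1.insert tokenToRemove c
          if c ≤ 0 then (ht.erase tokenToRemove, st1.2) else (ht, st1.2)
        else st1)
      (d, tot)).2 = tot + ((List.range' i rest.length).countP (pvHit tokens) : Int) := by
  induction rest generalizing i d tot with
  | nil => simp [PySem.List.enumerate]
  | cons t rest' ih =>
    have hi : i < tokens.length := by
      by_contra hle
      rw [List.drop_eq_nil_of_le (by omega)] at hrest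
      exact List.cons_ne_nil t rest' hrest
    have hilen : i < (tokens.map PySem.Str.lower).length := by simpa using hi
    have hcons := List.drop_eq_getElem_cons hi
    rw [← hrest] at hcons
    injection hcons with ht hrest'
    -- ht : t = tokens[i], hrest' : rest' = tokens.drop (i+1)
    have htok : PySem.Str.lower t = (tokens.map PySem.Str.lower)[i] := by
      rw [List.getElem_map, ht]
    have hgetd : (tokens.map PySem.Str.lower).getD i "" = PySem.Str.lower t := by
      rw [List.getD_eq_getElem _ _ hilen, htok]
    have henum : PySem.List.enumerate (t :: rest') (i : Int) =
        ((i : Int), t) :: PySem.List.enumerate rest' (((i + 1 : Nat) : Int)) := by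
      simp [PySem.List.enumerate]
    rw [henum, List.foldl_cons]
    dsimp only
    rw [hinv (PySem.Str.lower t)]
    have hhit : pvHit tokens i = decide (0 < (pvWin tokens i).count (PySem.Str.lower t)) := by
      unfold pvHit
      rw [hgetd]
      simp [List.count_pos_iff]
    have hfin : ∀ δ : Int, (δ = if pvHit tokens i then 1 else 0) →
        (tot + δ) + ((List.range' (i+1) rest'.length).countP (pvHit tokens) : Int) =
        tot + ((List.range' i (t :: rest').length).countP (pvHit tokens) : Int) := by
      intro δ hδ
      rw [show (t :: rest').length = rest'.length + 1 from rfl, List.range'_succ,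
          List.countP_cons]
      rcases hb : pvHit tokens i with _ | _ <;> rw [hb] at hδ <;> push_cast <;> simp [hδ] <;> ring
    by_cases hc0 : 0 < (pvWin tokens i).count (PySem.Str.lower t)
    · rw [if_pos hc0]
      dsimp only
      have hinv1 := pvInv_insert (pvWin tokens i) d (PySem.Str.lower t) hinv
      by_cases h10 : (10 : Int) ≤ (i : Int)
      · rw [if_pos h10]
        have hge : 10 ≤ i := by exact_mod_cast h10
        rw [show ((i : Int) - 10) = ((i - 10 : Nat) : Int) by omega, PySem.List.pyGetD_natCast,
            List.getD_eq_getElem _ _ (by omega : i - 10 < tokens.length)]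
        have hsplit := pvWin_succ_ge tokens i hi hge
        rw [← ht] at hsplit
        have hd1 : ∀ k, (d.insert (PySem.Str.lower t)
            (((pvWin tokens i).count (PySem.Str.lower t) : Int) + 1)).get? k =
            if 0 < ((PySem.Str.lower (tokens[i - 10]'(by omega)) :: pvWin tokens (i+1)).count k)
            then some (((PySem.Str.lower (tokens[i - 10]'(by omega)) :: pvWin tokens (i+1)).count k : Int))
            else none := by
          intro k; rw [hinv1 k, ← hsplit]
        have hrem := pvInv_remove (pvWin tokens (i+1)) (PySem.Str.lower (tokens[i - 10]'(by omega)))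
          _ hd1
        by_cases hz : (d.insert (PySem.Str.lower t)
              (((pvWin tokens i).count (PySem.Str.lower t) : Int) + 1)).getD
              (PySem.Str.lower (tokens[i - 10]'(by omega))) 0 - 1 ≤ 0
        · rw [if_pos hz]
          rw [ih (i+1) _ (tot + 1) hrest' (by intro k; have := hrem k; rw [if_pos hz] at this; exact this)]
          exact hfin 1 (by rw [hhit, decide_eq_true hc0]; rfl) 
        · rw [if_neg hz]
          rw [ih (i+1) _ (tot + 1) hrest' (by intro k; have := hrem k; rw [if_neg hz] at this; exact this)]
          exact hfin 1 (by rw [hhit, decide_eq_true hc0]; rfl)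
      · rw [if_neg h10]
        have hlt : i < 10 := by omega
        have hw1 : pvWin tokens (i+1) = pvWin tokens i ++ [PySem.Str.lower t] := by
          rw [pvWin_succ_lt tokens i hi hlt, ← ht]
        rw [ih (i+1) _ (tot + 1) hrest' (by intro k; rw [hw1]; exact hinv1 k)]
        exact hfin 1 (by rw [hhit, decide_eq_true hc0]; rfl)
    · rw [if_neg hc0]
      dsimp only
      have hz0 : (pvWin tokens i).count (PySem.Str.lower t) = 0 := by omega
      have hone : ((pvWin tokens i).count (PySem.Str.lower t) : Int) + 1 = 1 := by
        rw [hz0]; ring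
      have hinv1 := pvInv_insert (pvWin tokens i) d (PySem.Str.lower t) hinv
      rw [hone] at hinv1
      by_cases h10 : (10 : Int) ≤ (i : Int)
      · rw [if_pos h10]
        have hge : 10 ≤ i := by exact_mod_cast h10
        rw [show ((i : Int) - 10) = ((i - 10 : Nat) : Int) by omega, PySem.List.pyGetD_natCast,
            List.getD_eq_getElem _ _ (by omega : i - 10 < tokens.length)]
        have hsplit := pvWin_succ_ge tokens i hi hge
        rw [← ht] at hsplit
        have hd1 : ∀ k, (d.insert (PySem.Str.lower t) 1).get? k =
            if 0 < ((PySem.Str.lower (tokens[i - 10]'(by omega)) :: pvWin tokens (i+1)).count k)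
            then some (((PySem.Str.lower (tokens[i - 10]'(by omega)) :: pvWin tokens (i+1)).count k : Int))
            else none := by
          intro k; rw [hinv1 k, ← hsplit]
        have hrem := pvInv_remove (pvWin tokens (i+1)) (PySem.Str.lower (tokens[i - 10]'(by omega)))
          _ hd1
        by_cases hz : (d.insert (PySem.Str.lower t) 1).getD
              (PySem.Str.lower (tokens[i - 10]'(by omega))) 0 - 1 ≤ 0
        · rw [if_pos hz]
          rw [ih (i+1) _ tot hrest' (by intro k; have := hrem k; rw [if_pos hz] at this; exact this)]
          simpa using hfin 0 (by rw [hhit, decide_eq_false hc0]; rfl)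
        · rw [if_neg hz]
          rw [ih (i+1) _ tot hrest' (by intro k; have := hrem k; rw [if_neg hz] at this; exact this)]
          simpa using hfin 0 (by rw [hhit, decide_eq_false hc0]; rfl)
      · rw [if_neg h10]
        have hlt : i < 10 := by omega
        have hw1 : pvWin tokens (i+1) = pvWin tokens i ++ [PySem.Str.lower t] := by
          rw [pvWin_succ_lt tokens i hi hlt, ← ht]
        rw [ih (i+1) _ tot hrest' (by intro k; rw [hw1]; exact hinv1 k)]
        simpa using hfin 0 (by rw [hhit, decide_eq_false hc0]; rfl)

theorem pvA_eq (tokens : List String) :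
    ((PySem.List.enumerate tokens).foldl
      (fun (st : PySem.Dict String Int × Int) (p : Int × String) =>
        let index := p.1
        let token := PySem.Str.lower p.2
        let st1 :=
          match st.1.get? token with
          | some v => (st.1.insert token (v + 1), st.2 + 1)
          | none => (st.1.insert token 1, st.2)
        if 10 ≤ index then
          let tokenToRemove := PySem.Str.lower (PySem.List.pyGetD tokens (index - 10) "")
          let c := st1.1.getD tokenToRemove 0 - 1
          let ht := st1.1.insert tokenToRemove c
          if c ≤ 0 then (ht.erase tokenToRemove, st1.2) else (ht, st1.2)
        else st1)
      (PySem.Dict.empty, 0)).2 = ((List.range tokens.length).countP (pvHit tokens) : Int) := by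
  have h := pvA_loop tokens tokens 0 PySem.Dict.empty 0 (by simp)
    (by intro k; simp [pvWin, PySem.Dict.get?_empty])
  rw [List.range_eq_range']
  simpa using h

theorem pvA_eq' (tokens : List String) :
    countRepetitions tokens = ((List.range tokens.length).countP (pvHit tokens) : Int) := by
  unfold countRepetitions
  exact pvA_eq tokens

theorem pvB_eq (tokens : List String) :
    countRepetitions_alt tokens = ((List.range tokens.length).countP (pvHit tokens) : Int) := by
  unfold countRepetitions_alt
  rw [PySem.List.pyRange_zero_natCast, List.foldl_map]
  rw [PySem.List.foldl_congr_mem (g := fun (total : Int) k =>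
      if pvHit tokens k then total + 1 else total)]
  · exact PySem.List.foldl_count_if (pvHit tokens) (List.range tokens.length) 0 |>.trans (by ring)
  · intro total k hk
    rw [List.mem_range] at hk
    have hmax : max 0 ((k : Int) - 10) = ((k - 10 : Nat) : Int) := by omega
    have hw : (PySem.List.slice tokens (some (max 0 ((k : Int) - 10))) (some (k : Int))).map
        PySem.Str.lower = pvWin tokens k := by
      rw [hmax, PySem.List.slice_natCast, pvWin, List.drop_take, List.map_take, List.map_drop]
    have hg : PySem.Str.lower (PySem.List.pyGetD tokens (k : Int) "") =
        (tokens.map PySem.Str.lower).getD k "" := by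
      rw [PySem.List.pyGetD_natCast, List.getD_eq_getElem _ _ hk,
          List.getD_eq_getElem _ _ (by simpa using hk), List.getElem_map]
    simp only [hw, hg, pvHit]
    rfl

-- ===== VERDICT (by name: the statement is the Claim_ definition above) =====
theorem countRepetitions_spec : Claim_equal_countRepetitions := by
  intro tokens _
  unfold Spec_countRepetitions
  rw [pvA_eq', pvB_eq]
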